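-- pv_equiv track=rewrite | github.com/CompOmics/oui-discovery | oui-discovery-vv/tpp_preprocess.py | classify_peptide_tpp
-- ===== SOURCE A (Python) =====
-- def classify_peptide_tpp(row):
--     if any('decoy_' in i for i in row):
--         return 'decoy'
--     ##row=[p.split("|")[1] for p in row]
--     if any('CONTAMINANT' in x or 'contaminant' in x for x in row):
--         return 'Contam'
--     elif all(x.startswith('II_') or x.startswith('IP_') for x in row):
--         if len(row)==1:
--             return "unique_to_Noncanon"
--         else:
--             return 'shared_in_Noncanon'
--     elif all(not x.startswith('II_') and not x.startswith('IP_') and not 'CONTAMINANT' in x and not 'contaminant' in x for x in row):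
--         if len(row)==1:
--             return "unique_to_Canon"
--         else:
--             return 'shared_in_Canon'
--     else:
--         return 'shared_btw_can_noncan'
-- ===== SOURCE B (Python) =====
-- def _kind(x):
--     if 'decoy_' in x:
--         return 'decoy'
--     if 'CONTAMINANT' in x or 'contaminant' in x:
--         return 'contam'
--     if x.startswith('II_') or x.startswith('IP_'):
--         return 'noncanon'
--     return 'canon'
--
--
-- def classify_peptide_tpp(row):
--     kinds = {_kind(x) for x in row}
--     if 'decoy' in kinds:
--         return 'decoy'
--     if 'contam' in kinds:
--         return 'Contam'
--     if 'canon' not in kinds: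
--         return 'unique_to_Noncanon' if len(row) == 1 else 'shared_in_Noncanon'
--     if 'noncanon' not in kinds:
--         return 'unique_to_Canon' if len(row) == 1 else 'shared_in_Canon'
--     return 'shared_btw_can_noncan'
-- ===== Notes on version B (the rewrite author's own statement) =====
-- stated objective: alternative
-- what changed: Instead of A's row-level any/all predicate passes, B classifies each element once into one of four mutually exclusive kinds (decoy/contam/noncanon/canon), collects the distinct kinds into a set, and maps that kind-set to the label.
import Mathlib
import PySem

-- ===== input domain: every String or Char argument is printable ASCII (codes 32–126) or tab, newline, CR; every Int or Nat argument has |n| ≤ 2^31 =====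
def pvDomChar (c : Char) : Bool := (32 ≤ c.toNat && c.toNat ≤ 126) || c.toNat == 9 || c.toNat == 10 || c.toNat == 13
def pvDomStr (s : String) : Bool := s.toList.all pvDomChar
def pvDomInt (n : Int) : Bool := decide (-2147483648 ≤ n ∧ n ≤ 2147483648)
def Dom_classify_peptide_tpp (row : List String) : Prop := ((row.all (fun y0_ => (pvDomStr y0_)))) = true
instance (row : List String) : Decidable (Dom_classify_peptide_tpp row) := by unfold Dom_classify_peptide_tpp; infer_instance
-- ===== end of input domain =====

-- B classifies each element once into one of four exclusive kinds, collects the distinct kinds as a set, and maps that kind-set to the label (objective: alternative).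

-- ===== PORT A =====
def classify_peptide_tpp (row : List String) : String :=
  if row.any (fun i => PySem.Str.isIn "decoy_" i) then "decoy"
  else if row.any (fun x => PySem.Str.isIn "CONTAMINANT" x || PySem.Str.isIn "contaminant" x) then "Contam"
  else if row.all (fun x => PySem.Str.startswith x "II_" || PySem.Str.startswith x "IP_") then
    (if row.length == 1 then "unique_to_Noncanon" else "shared_in_Noncanon")
  else if row.all (fun x => !PySem.Str.startswith x "II_" && !PySem.Str.startswith x "IP_"
      && !PySem.Str.isIn "CONTAMINANT" x && !PySem.Str.isIn "contaminant" x) then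
    (if row.length == 1 then "unique_to_Canon" else "shared_in_Canon")
  else "shared_btw_can_noncan"

-- ===== PORT B =====
-- _kind: each element falls into exactly one of four kinds
def classify_peptide_tpp_altKind (x : String) : String :=
  if PySem.Str.isIn "decoy_" x then "decoy"
  else if PySem.Str.isIn "CONTAMINANT" x || PySem.Str.isIn "contaminant" x then "contam"
  else if PySem.Str.startswith x "II_" || PySem.Str.startswith x "IP_" then "noncanon"
  else "canon"

-- kinds = {_kind(x) for x in row}
def classify_peptide_tpp_altKinds (row : List String) : PySem.Set String :=
  PySem.Set.ofList (row.map classify_peptide_tpp_altKind)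

def classify_peptide_tpp_alt (row : List String) : String :=
  if PySem.Set.contains (classify_peptide_tpp_altKinds row) "decoy" then "decoy"
  else if PySem.Set.contains (classify_peptide_tpp_altKinds row) "contam" then "Contam"
  else if !PySem.Set.contains (classify_peptide_tpp_altKinds row) "canon" then
    (if row.length == 1 then "unique_to_Noncanon" else "shared_in_Noncanon")
  else if !PySem.Set.contains (classify_peptide_tpp_altKinds row) "noncanon" then
    (if row.length == 1 then "unique_to_Canon" else "shared_in_Canon")
  else "shared_btw_can_noncan"

-- ===== PRECONDITION & SPEC =====
def Spec_classify_peptide_tpp (row : List String) (out : String) : Prop := out = classify_peptide_tpp_alt row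
instance (row : List String) (out : String) : Decidable (Spec_classify_peptide_tpp row out) := by unfold Spec_classify_peptide_tpp; infer_instance

-- ===== CLAIM (what is proved, stated in full; the proofs are below) =====
def Claim_equal_classify_peptide_tpp : Prop := ∀ (row : List String), Dom_classify_peptide_tpp row → Spec_classify_peptide_tpp row (classify_peptide_tpp row)

-- ===== LEMMAS AND PROOFS =====

lemma kind_eq_decoy (x : String) :
    classify_peptide_tpp_altKind x = "decoy" ↔ PySem.Str.isIn "decoy_" x = true := by
  unfold classify_peptide_tpp_altKind
  split_ifs with h1 h2 h3
  · exact iff_of_true rfl h1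
  · exact iff_of_false (by decide) h1
  · exact iff_of_false (by decide) h1
  · exact iff_of_false (by decide) h1

lemma kind_eq_contam (x : String) :
    classify_peptide_tpp_altKind x = "contam" ↔
      (PySem.Str.isIn "decoy_" x = false ∧
       (PySem.Str.isIn "CONTAMINANT" x || PySem.Str.isIn "contaminant" x) = true) := by
  unfold classify_peptide_tpp_altKind
  split_ifs with h1 h2 h3
  · exact iff_of_false (by decide) (fun h => by rw [h1] at h; cases h.1)
  · exact iff_of_true rfl ⟨Bool.eq_false_iff.mpr h1, h2⟩
  · exact iff_of_false (by decide) (fun h => h2 h.2)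
  · exact iff_of_false (by decide) (fun h => h2 h.2)

lemma kind_eq_canon (x : String) :
    classify_peptide_tpp_altKind x = "canon" ↔
      (PySem.Str.isIn "decoy_" x = false ∧
       (PySem.Str.isIn "CONTAMINANT" x || PySem.Str.isIn "contaminant" x) = false ∧
       (PySem.Str.startswith x "II_" || PySem.Str.startswith x "IP_") = false) := by
  unfold classify_peptide_tpp_altKind
  split_ifs with h1 h2 h3
  · exact iff_of_false (by decide) (fun h => by rw [h1] at h; cases h.1)
  · exact iff_of_false (by decide) (fun h => by rw [h2] at h; cases h.2.1)
  · exact iff_of_false (by decide) (fun h => by rw [h3] at h; cases h.2.2)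
  · exact iff_of_true rfl ⟨Bool.eq_false_iff.mpr h1, Bool.eq_false_iff.mpr h2, Bool.eq_false_iff.mpr h3⟩

lemma kind_eq_noncanon (x : String) :
    classify_peptide_tpp_altKind x = "noncanon" ↔
      (PySem.Str.isIn "decoy_" x = false ∧
       (PySem.Str.isIn "CONTAMINANT" x || PySem.Str.isIn "contaminant" x) = false ∧
       (PySem.Str.startswith x "II_" || PySem.Str.startswith x "IP_") = true) := by
  unfold classify_peptide_tpp_altKind
  split_ifs with h1 h2 h3
  · exact iff_of_false (by decide) (fun h => by rw [h1] at h; cases h.1)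
  · exact iff_of_false (by decide) (fun h => by rw [h2] at h; cases h.2.1)
  · exact iff_of_true rfl ⟨Bool.eq_false_iff.mpr h1, Bool.eq_false_iff.mpr h2, h3⟩
  · exact iff_of_false (by decide) (fun h => h3 h.2.2)

lemma contains_kinds_iff (row : List String) (k : String) :
    PySem.Set.contains (classify_peptide_tpp_altKinds row) k = true ↔
      ∃ x ∈ row, classify_peptide_tpp_altKind x = k := by
  unfold classify_peptide_tpp_altKinds
  rw [PySem.Set.contains_iff, PySem.Set.mem_ofList, List.mem_map]

-- ===== VERDICT (by name: the statement is the Claim_ definition above) =====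
theorem classify_peptide_tpp_spec : Claim_equal_classify_peptide_tpp := by
  intro row _
  show classify_peptide_tpp row = classify_peptide_tpp_alt row
  unfold classify_peptide_tpp classify_peptide_tpp_alt
  by_cases h1 : (row.any fun i => PySem.Str.isIn "decoy_" i) = true
  · obtain ⟨x, hx, hd⟩ := List.any_eq_true.mp h1
    rw [if_pos h1, if_pos ((contains_kinds_iff row "decoy").mpr ⟨x, hx, (kind_eq_decoy x).mpr hd⟩)]
  · have hnd : ∀ x ∈ row, PySem.Str.isIn "decoy_" x = false := by
      intro x hx
      exact Bool.eq_false_iff.mpr (List.any_eq_false.mp (Bool.eq_false_iff.mpr h1) x hx)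
    have hcd : ¬ (PySem.Set.contains (classify_peptide_tpp_altKinds row) "decoy" = true) := by
      intro hc
      obtain ⟨x, hx, hk⟩ := (contains_kinds_iff row "decoy").mp hc
      have := (kind_eq_decoy x).mp hk
      rw [hnd x hx] at this
      cases this
    rw [if_neg h1, if_neg hcd]
    by_cases h2 : (row.any fun x => PySem.Str.isIn "CONTAMINANT" x || PySem.Str.isIn "contaminant" x) = true
    · obtain ⟨x, hx, hc⟩ := List.any_eq_true.mp h2
      rw [if_pos h2, if_pos ((contains_kinds_iff row "contam").mpr ⟨x, hx, (kind_eq_contam x).mpr ⟨hnd x hx, hc⟩⟩)]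
    · have hnc : ∀ x ∈ row, (PySem.Str.isIn "CONTAMINANT" x || PySem.Str.isIn "contaminant" x) = false := by
        intro x hx
        exact Bool.eq_false_iff.mpr (List.any_eq_false.mp (Bool.eq_false_iff.mpr h2) x hx)
      have hcc : ¬ (PySem.Set.contains (classify_peptide_tpp_altKinds row) "contam" = true) := by
        intro hc
        obtain ⟨x, hx, hk⟩ := (contains_kinds_iff row "contam").mp hc
        have := ((kind_eq_contam x).mp hk).2
        rw [hnc x hx] at this
        cases this
      rw [if_neg h2, if_neg hcc]
      have h3 : ((row.all fun x => PySem.Str.startswith x "II_" || PySem.Str.startswith x "IP_") = true)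
          ↔ ((!PySem.Set.contains (classify_peptide_tpp_altKinds row) "canon") = true) := by
        rw [Bool.not_eq_true', Bool.eq_false_iff, Ne, contains_kinds_iff, List.all_eq_true]
        constructor
        · rintro h ⟨x, hx, hk⟩
          have hpf := ((kind_eq_canon x).mp hk).2.2
          rw [h x hx] at hpf
          cases hpf
        · intro h x hx
          by_contra hp
          exact h ⟨x, hx, (kind_eq_canon x).mpr ⟨hnd x hx, hnc x hx, Bool.eq_false_iff.mpr hp⟩⟩
      have h4 : ((row.all fun x => !PySem.Str.startswith x "II_" && !PySem.Str.startswith x "IP_"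
              && !PySem.Str.isIn "CONTAMINANT" x && !PySem.Str.isIn "contaminant" x) = true)
          ↔ ((!PySem.Set.contains (classify_peptide_tpp_altKinds row) "noncanon") = true) := by
        rw [Bool.not_eq_true', Bool.eq_false_iff, Ne, contains_kinds_iff, List.all_eq_true]
        constructor
        · rintro h ⟨x, hx, hk⟩
          have hpre := ((kind_eq_noncanon x).mp hk).2.2
          have hx1 := h x hx
          simp only [Bool.and_eq_true, Bool.not_eq_true'] at hx1
          rw [Bool.or_eq_true] at hpre
          rcases hpre with hp | hp
          · rw [hx1.1.1.1] at hp; cases hp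
          · rw [hx1.1.1.2] at hp; cases hp
        · intro h x hx
          have hor : (PySem.Str.startswith x "II_" || PySem.Str.startswith x "IP_") = false := by
            cases hor : (PySem.Str.startswith x "II_" || PySem.Str.startswith x "IP_") with
            | false => rfl
            | true => exact absurd ⟨x, hx, (kind_eq_noncanon x).mpr ⟨hnd x hx, hnc x hx, hor⟩⟩ h
          have hc1 := hnc x hx
          simp only [Bool.or_eq_false_iff] at hor hc1
          simp only [Bool.and_eq_true, Bool.not_eq_true']
          exact ⟨⟨⟨hor.1, hor.2⟩, hc1.1⟩, hc1.2⟩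
      exact if_congr h3 rfl (if_congr h4 rfl rfl)
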